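-- pv_equiv track=rewrite | github.com/sigamani/block-sim | experiments_analysis/auto_provision_plot.py | extract_num_available_instances_plot
-- ===== SOURCE A (Python) =====
-- def extract_num_available_instances_plot(num_instances_list, min_instances=6):
--     """
--         generate line outline for the number of available instances
--     """
--     instance_jump_points = {min_instances: 0}
--     for i in range(len(num_instances_list)):
--         if num_instances_list[i] not in instance_jump_points:
--             instance_jump_points[num_instances_list[i]] = i
--     num_instance_curve = []
--     current_instance = num_instances_list[0]
--     turn_point = [instance_jump_points[num_instance]
--                   for num_instance in instance_jump_points.keys() if num_instance > current_instance]
--     for i in range(len(num_instances_list)):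
--         if i in turn_point:
--             current_instance += 1
--         num_instance_curve.append(current_instance)
--     return num_instance_curve
-- ===== SOURCE B (Python) =====
-- def extract_num_available_instances_plot(num_instances_list, min_instances=6):
--     """Single forward pass: count first occurrences above the start value as steps."""
--     start = num_instances_list[0]
--     current = start + 1 if min_instances > start else start
--     seen = {min_instances, start}
--     curve = []
--     for v in num_instances_list:
--         if v not in seen:
--             seen.add(v)
--             if v > start:
--                 current += 1
--         curve.append(current)
--     return curve
-- ===== Notes on version B (the rewrite author's own statement) =====
-- stated objective: faster
-- what changed: A builds a first-occurrence dict seeded with min_instances, extracts a turn_point index list, then re-sweeps every index testing list membership in turn_point; B is one forward pass over the values with a seen-set and a running counter whose initial value absorbs the step that A seeds for min_instances at the first position.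
import Mathlib
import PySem

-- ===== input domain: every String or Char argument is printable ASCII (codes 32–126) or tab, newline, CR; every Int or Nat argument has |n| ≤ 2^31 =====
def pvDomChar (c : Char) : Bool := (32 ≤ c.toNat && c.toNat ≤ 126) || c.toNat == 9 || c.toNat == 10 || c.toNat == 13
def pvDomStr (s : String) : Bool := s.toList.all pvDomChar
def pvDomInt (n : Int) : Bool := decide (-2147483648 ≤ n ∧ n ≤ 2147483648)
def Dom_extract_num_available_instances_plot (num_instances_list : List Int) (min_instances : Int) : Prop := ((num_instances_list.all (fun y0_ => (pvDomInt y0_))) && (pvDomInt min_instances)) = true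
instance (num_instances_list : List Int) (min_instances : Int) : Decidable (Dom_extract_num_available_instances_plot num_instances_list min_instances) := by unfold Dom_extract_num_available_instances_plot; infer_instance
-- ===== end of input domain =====

-- B replaces A's three passes (first-occurrence dict, turn_point index list, index sweep) by one forward pass
-- with a seen-set and a running counter. Equivalence proved for nonempty input (Pre_).


-- ===== PORT A =====
def extract_num_available_instances_plot (num_instances_list : List Int) (min_instances : Int) : List Int :=
  -- instance_jump_points = {min_instances: 0}; for i in range(len): if xs[i] not in jp: jp[xs[i]] = i
  let jp : PySem.Dict Int Int :=
    (PySem.List.pyRange 0 (num_instances_list.length : Int) 1).foldl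
      (fun d i =>
        if d.contains (PySem.List.pyGetD num_instances_list i 0) then d
        else d.insert (PySem.List.pyGetD num_instances_list i 0) i)
      ((PySem.Dict.empty).insert min_instances 0)
  -- current_instance = num_instances_list[0]  (IndexError on []: excluded by Pre_)
  let current_instance : Int := PySem.List.pyGetD num_instances_list 0 0
  -- turn_point = [jp[k] for k in jp.keys() if k > current_instance]  (k present, so jp[k] = getD k 0)
  let turn_point : List Int :=
    (jp.keys.filter (fun k => decide (current_instance < k))).map (fun k => jp.getD k 0)
  -- for i in range(len): if i in turn_point: current += 1; curve.append(current)
  ((PySem.List.pyRange 0 (num_instances_list.length : Int) 1).foldl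
      (fun (st : Int × List Int) i =>
        let cur := if turn_point.contains i then st.1 + 1 else st.1
        (cur, st.2 ++ [cur]))
      (current_instance, [])).2

-- ===== PORT B =====
def extract_num_available_instances_plot_alt (num_instances_list : List Int) (min_instances : Int) : List Int :=
  -- start = xs[0]  (IndexError on []: excluded by Pre_)
  let start : Int := PySem.List.pyGetD num_instances_list 0 0
  let cur0 : Int := if start < min_instances then start + 1 else start
  (num_instances_list.foldl
      (fun (st : PySem.Set Int × Int × List Int) v =>
        if PySem.Set.contains st.1 v then (st.1, st.2.1, st.2.2 ++ [st.2.1])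
        else
          let seen := PySem.Set.add st.1 v
          let cur := if start < v then st.2.1 + 1 else st.2.1
          (seen, cur, st.2.2 ++ [cur]))
      (PySem.Set.ofList [min_instances, start], cur0, ([] : List Int))).2.2

-- ===== PRECONDITION & SPEC =====
-- A (and B) index num_instances_list[0]: the empty list raises IndexError and is excluded.
def Pre_extract_num_available_instances_plot (num_instances_list : List Int) (min_instances : Int) : Prop :=
  num_instances_list ≠ []
instance (num_instances_list : List Int) (min_instances : Int) : Decidable (Pre_extract_num_available_instances_plot num_instances_list min_instances) := by unfold Pre_extract_num_available_instances_plot; infer_instance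
def pvWitness_extract_num_available_instances_plot : List Int × Int := ([4, 4, 5, 7, 5], 6)

def Spec_extract_num_available_instances_plot (num_instances_list : List Int) (min_instances : Int) (out : List Int) : Prop := out = extract_num_available_instances_plot_alt num_instances_list min_instances
instance (num_instances_list : List Int) (min_instances : Int) (out : List Int) : Decidable (Spec_extract_num_available_instances_plot num_instances_list min_instances out) := by unfold Spec_extract_num_available_instances_plot; infer_instance

-- ===== CLAIM (what is proved, stated in full; the proofs are below) =====
def Claim_equal_extract_num_available_instances_plot : Prop := ∀ (num_instances_list : List Int) (min_instances : Int), Dom_extract_num_available_instances_plot num_instances_list min_instances → Pre_extract_num_available_instances_plot num_instances_list min_instances → Spec_extract_num_available_instances_plot num_instances_list min_instances (extract_num_available_instances_plot num_instances_list min_instances)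

-- ===== LEMMAS AND PROOFS =====

/-- Structural form of an index loop `for i in range(len(xs)): … i … xs[i] …`. -/
def enumFold {α β : Type} (F : β → Int → α → β) : β → Int → List α → β
  | b, _, [] => b
  | b, i, x :: xs => enumFold F (F b i x) (i + 1) xs

theorem foldl_pyRange_idx {α β : Type} (F : β → Int → α → β) (d : α) :
    ∀ (xs : List α) (s : Int) (init : β),
      (PySem.List.pyRange 0 (xs.length : Int) 1).foldl
        (fun a i => F a (s + i) (PySem.List.pyGetD xs i d)) init
      = enumFold F init s xs := by
  intro xs
  induction xs with
  | nil => intro s init; rw [PySem.List.pyRange_one_eq_nil (by simp)]; rfl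
  | cons x xs ih =>
    intro s init
    have hlen : (((x :: xs).length : Int)) = (xs.length : Int) + 1 := by push_cast [List.length_cons]; ring
    rw [hlen, PySem.List.pyRange_one_cons (by positivity)]
    simp only [List.foldl_cons, enumFold]
    have h0 : F init (s + 0) (PySem.List.pyGetD (x :: xs) 0 d) = F init s x := by
      rw [PySem.List.pyGetD_zero_cons, add_zero]
    rw [h0, ← ih (s+1) (F init s x)]
    rw [PySem.List.pyRange_one, PySem.List.pyRange_one]
    have hn1 : (((xs.length : Int) + 1) - (0 + 1)).toNat = xs.length := by omega
    have hn2 : (((xs.length : Int)) - 0).toNat = xs.length := by omega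
    rw [hn1, hn2, List.foldl_map, List.foldl_map]
    congr 1
    funext a k
    have hidx : ((0 : Int) + 1 + (k : Int)) = (((k + 1 : Nat)) : Int) := by push_cast; ring
    have hidx2 : ((0 : Int) + (k : Int)) = ((k : Nat) : Int) := by ring
    rw [hidx, PySem.List.pyGetD_natCast, hidx2, PySem.List.pyGetD_natCast]
    simp [List.getD]
    ring_nf

/-- First index of `k` in `ys`, counting from `i0` (A's dict values). -/
def firstIdx? : List Int → Int → Int → Option Int
  | [], _, _ => none
  | v :: vs, i, k => if v = k then some i else firstIdx? vs (i + 1) k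

theorem jpFold_get? :
    ∀ (ys : List Int) (i0 : Int) (d : PySem.Dict Int Int) (k : Int),
      (enumFold (fun (d : PySem.Dict Int Int) j v =>
          if d.contains v then d else d.insert v j) d i0 ys).get? k
      = if d.contains k then d.get? k else firstIdx? ys i0 k := by
  intro ys
  induction ys with
  | nil => intro i0 d k; simp [enumFold, firstIdx?, PySem.Dict.get?_eq_none_iff_contains]
  | cons v vs ih =>
    intro i0 d k
    simp only [enumFold, firstIdx?]
    by_cases hv : d.contains v = true
    · rw [if_pos hv, ih]
      by_cases hk : d.contains k = true
      · rw [if_pos hk, if_pos hk]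
      · rw [if_neg hk, if_neg hk]
        have hne : v ≠ k := fun h => hk (h ▸ hv)
        rw [if_neg hne]
    · rw [if_neg hv, ih]
      by_cases hvk : v = k
      · subst hvk
        rw [if_pos rfl]
        have h1 : (d.insert v i0).contains v = true := PySem.Dict.contains_insert_self d v i0
        rw [if_pos h1, PySem.Dict.get?_insert_self]
        rw [if_neg hv]
      · rw [if_neg hvk]
        have h2 : (d.insert v i0).contains k = d.contains k := by
          rw [PySem.Dict.contains_insert]
          simp [Ne.symm hvk]
        rw [h2]
        by_cases hk : d.contains k = true
        · rw [if_pos hk, if_pos hk, PySem.Dict.get?_insert_of_ne (hne := Ne.symm hvk)]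
        · rw [if_neg hk, if_neg hk]

theorem firstIdx?_eq_some :
    ∀ (ys : List Int) (i0 k t : Int),
      firstIdx? ys i0 k = some t
        ↔ ∃ j : Nat, t = i0 + (j : Int) ∧ ys[j]? = some k ∧ k ∉ ys.take j := by
  intro ys
  induction ys with
  | nil => intro i0 k t; simp [firstIdx?]
  | cons v vs ih =>
    intro i0 k t
    simp only [firstIdx?]
    by_cases hvk : v = k
    · subst hvk
      rw [if_pos rfl]
      constructor
      · rintro ⟨rfl⟩
        exact ⟨0, by simp⟩
      · rintro ⟨j, rfl, hget, hmem⟩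
        cases j with
        | zero => simp
        | succ j => simp [List.take_succ_cons] at hmem
    · rw [if_neg hvk, ih]
      constructor
      · rintro ⟨j, rfl, hget, hmem⟩
        exact ⟨j + 1, by push_cast; ring, by simpa using hget, by
          simp [List.take_succ_cons, hmem, Ne.symm hvk]⟩
      · rintro ⟨j, rfl, hget, hmem⟩
        cases j with
        | zero => simp at hget; exact absurd hget hvk
        | succ j =>
          refine ⟨j, by push_cast; ring, by simpa using hget, ?_⟩
          simp [List.take_succ_cons] at hmem
          exact hmem.2

theorem firstIdx?_eq_none :
    ∀ (ys : List Int) (i0 k : Int), firstIdx? ys i0 k = none ↔ k ∉ ys := by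
  intro ys
  induction ys with
  | nil => intro i0 k; simp [firstIdx?]
  | cons v vs ih =>
    intro i0 k
    by_cases hvk : v = k
    · subst hvk; simp [firstIdx?]
    · simp [firstIdx?, hvk, ih, Ne.symm hvk]

/-- A's loop step over (counter, curve) at index `j` (value unused). -/
def stepA (tp : List Int) : (Int × List Int) → Int → Int → (Int × List Int) :=
  fun st j _ =>
    let cur := if tp.contains j then st.1 + 1 else st.1
    (cur, st.2 ++ [cur])

/-- B's loop step over (seen, counter, curve). -/
def stepB (start : Int) : (PySem.Set Int × Int × List Int) → Int → (PySem.Set Int × Int × List Int) :=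
  fun st v =>
    if PySem.Set.contains st.1 v then (st.1, st.2.1, st.2.2 ++ [st.2.1])
    else
      let seen := PySem.Set.add st.1 v
      let cur := if start < v then st.2.1 + 1 else st.2.1
      (seen, cur, st.2.2 ++ [cur])

/-- A's dict after the first loop, in structural form. -/
def jpD (xs : List Int) (m : Int) : PySem.Dict Int Int :=
  enumFold (fun (d : PySem.Dict Int Int) j v => if d.contains v then d else d.insert v j)
    ((PySem.Dict.empty).insert m 0) 0 xs

/-- A's turn_point list, in structural form. -/
def tpD (xs : List Int) (m x0 : Int) : List Int :=
  ((jpD xs m).keys.filter (fun k => decide (x0 < k))).map (fun k => (jpD xs m).getD k 0)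

theorem jpD_get? (xs : List Int) (m k : Int) :
    (jpD xs m).get? k = if k = m then some 0 else firstIdx? xs 0 k := by
  rw [jpD, jpFold_get?]
  by_cases hk : k = m
  · subst hk
    rw [if_pos (PySem.Dict.contains_insert_self _ _ _), PySem.Dict.get?_insert_self, if_pos rfl]
  · have : ((PySem.Dict.empty : PySem.Dict Int Int).insert m 0).contains k = false := by
      rw [PySem.Dict.contains_insert]
      simp [hk]
    rw [this, if_neg hk]
    simp

theorem jpD_mem_keys (xs : List Int) (m k : Int) :
    k ∈ (jpD xs m).keys ↔ (k = m ∨ k ∈ xs) := by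
  rw [← PySem.Dict.contains_iff_mem_keys, PySem.Dict.contains_eq_isSome_get?, jpD_get?]
  by_cases hk : k = m
  · simp [hk]
  · rw [if_neg hk, Option.isSome_iff_ne_none, ne_eq, firstIdx?_eq_none, not_not]
    simp [hk]

theorem mem_tpD (xs : List Int) (m x0 t : Int) :
    t ∈ tpD xs m x0 ↔ ∃ k, k ∈ (jpD xs m).keys ∧ x0 < k ∧ (jpD xs m).getD k 0 = t := by
  simp [tpD, List.mem_map, List.mem_filter]
  tauto

theorem tpD_zero (xs : List Int) (m x0 : Int) (hx0 : xs[0]? = some x0) :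
    (0 : Int) ∈ tpD xs m x0 ↔ x0 < m := by
  rw [mem_tpD]
  constructor
  · rintro ⟨k, hkmem, hlt, hgd⟩
    rw [PySem.Dict.getD_eq_get?_getD, jpD_get?] at hgd
    by_cases hk : k = m
    · exact hk ▸ hlt
    · rw [if_neg hk] at hgd
      rw [jpD_mem_keys] at hkmem
      have hkxs : k ∈ xs := hkmem.resolve_left hk
      have hnone : firstIdx? xs 0 k ≠ none := by rw [ne_eq, firstIdx?_eq_none]; exact not_not.mpr hkxs
      obtain ⟨j, hj⟩ := Option.ne_none_iff_exists'.mp hnone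
      rw [hj] at hgd
      simp at hgd
      rw [hgd] at hj
      rw [firstIdx?_eq_some] at hj
      obtain ⟨j', hj'0, hget, _⟩ := hj
      have : j' = 0 := by omega
      subst this
      rw [hx0] at hget
      simp at hget
      subst hget
      exact absurd hlt (lt_irrefl _)
  · intro hlt
    refine ⟨m, (jpD_mem_keys xs m m).mpr (Or.inl rfl), hlt, ?_⟩
    rw [PySem.Dict.getD_eq_get?_getD, jpD_get?, if_pos rfl]
    rfl

theorem tpD_pos (pre : List Int) (v : Int) (ys : List Int) (m x0 : Int) (hpre : pre ≠ []) :
    ((pre.length : Int) ∈ tpD (pre ++ v :: ys) m x0) ↔ (v ∉ pre ∧ v ≠ m ∧ x0 < v) := by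
  have hlen1 : 1 ≤ pre.length := List.length_pos_iff.mpr hpre
  have hget : (pre ++ v :: ys)[pre.length]? = some v := by
    rw [List.getElem?_append_right (le_refl _)]
    simp
  have htake : (pre ++ v :: ys).take pre.length = pre := by
    simp
  rw [mem_tpD]
  constructor
  · rintro ⟨k, hkmem, hlt, hgd⟩
    rw [PySem.Dict.getD_eq_get?_getD, jpD_get?] at hgd
    by_cases hk : k = m
    · rw [if_pos hk] at hgd
      simp at hgd
      omega
    · rw [if_neg hk] at hgd
      rw [jpD_mem_keys] at hkmem
      have hkxs : k ∈ pre ++ v :: ys := hkmem.resolve_left hk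
      have hnone : firstIdx? (pre ++ v :: ys) 0 k ≠ none := by
        rw [ne_eq, firstIdx?_eq_none]; exact not_not.mpr hkxs
      obtain ⟨j, hj⟩ := Option.ne_none_iff_exists'.mp hnone
      rw [hj] at hgd
      simp at hgd
      rw [hgd] at hj
      rw [firstIdx?_eq_some] at hj
      obtain ⟨j', hj'0, hget', htk⟩ := hj
      have : j' = pre.length := by omega
      subst this
      rw [hget] at hget'
      simp at hget'
      subst hget'
      rw [htake] at htk
      exact ⟨htk, hk, hlt⟩
  · rintro ⟨hvp, hvm, hlt⟩
    refine ⟨v, (jpD_mem_keys _ m v).mpr (Or.inr (by simp)), hlt, ?_⟩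
    rw [PySem.Dict.getD_eq_get?_getD, jpD_get?, if_neg hvm]
    have : firstIdx? (pre ++ v :: ys) 0 v = some (pre.length : Int) := by
      rw [firstIdx?_eq_some]
      exact ⟨pre.length, by omega, hget, by rw [htake]; exact hvp⟩
    rw [this]
    rfl

theorem loop_agree (m x0 : Int) (tp : List Int) (xs : List Int)
    (H : ∀ (pre : List Int) (v : Int) (ys : List Int), xs = pre ++ v :: ys → pre ≠ [] →
          (((pre.length : Int) ∈ tp) ↔ (v ∉ pre ∧ v ≠ m ∧ x0 < v))) :
    ∀ (ys pre : List Int), xs = pre ++ ys → pre ≠ [] →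
    ∀ (c : Int) (acc : List Int) (seen : PySem.Set Int),
      (∀ w, w ∈ seen ↔ (w = m ∨ w ∈ pre)) →
      (enumFold (stepA tp) (c, acc) (pre.length : Int) ys).1
        = (ys.foldl (stepB x0) (seen, c, acc)).2.1
      ∧ (enumFold (stepA tp) (c, acc) (pre.length : Int) ys).2
        = (ys.foldl (stepB x0) (seen, c, acc)).2.2 := by
  intro ys
  induction ys with
  | nil => intro pre _ _ c acc seen _; exact ⟨rfl, rfl⟩
  | cons v ys ih =>
    intro pre hxs hpre c acc seen hseen
    have htp := H pre v ys hxs hpre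
    have hlen : ((pre.length : Int) + 1) = (((pre ++ [v]).length : Int)) := by
      simp
    by_cases hv : v ∈ seen
    · have hvm : v = m ∨ v ∈ pre := (hseen v).mp hv
      have hcontains : PySem.Set.contains seen v = true := (PySem.Set.contains_iff seen v).mpr hv
      have htpf : tp.contains (pre.length : Int) = false := by
        have hnot : ¬ ((pre.length : Int) ∈ tp) := by rw [htp]; tauto
        exact Bool.eq_false_iff.mpr (fun hc => hnot (List.mem_of_elem_eq_true hc))
      have hA : stepA tp (c, acc) (pre.length : Int) v = (c, acc ++ [c]) := by
        simp only [stepA, htpf]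
        simp
      have hB : stepB x0 (seen, c, acc) v = (seen, c, acc ++ [c]) := by
        simp only [stepB, hcontains]
        simp
      simp only [enumFold, List.foldl_cons, hA, hB, hlen]
      exact ih (pre ++ [v]) (by rw [hxs]; simp) (by simp) c (acc ++ [c]) seen
        (by intro w; rw [hseen w]; simp only [List.mem_append, List.mem_singleton]
            constructor
            · tauto
            · rintro (h | h | rfl) <;> tauto)
    · have hvnm : v ≠ m ∧ v ∉ pre := by
        constructor <;> intro h <;> exact hv ((hseen v).mpr (by tauto))
      have hcontains : PySem.Set.contains seen v = false :=
        Bool.eq_false_iff.mpr (fun hc => hv ((PySem.Set.contains_iff seen v).mp hc))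
      have htpb : tp.contains (pre.length : Int) = decide (x0 < v) := by
        by_cases hlt : x0 < v
        · have : tp.contains (pre.length : Int) = true :=
            List.elem_eq_true_of_mem (htp.mpr ⟨hvnm.2, hvnm.1, hlt⟩)
          rw [this]
          simp [hlt]
        · have hnot : ¬ ((pre.length : Int) ∈ tp) := fun h => hlt (htp.mp h).2.2
          have : tp.contains (pre.length : Int) = false :=
            Bool.eq_false_iff.mpr (fun hc => hnot (List.mem_of_elem_eq_true hc))
          rw [this]
          simp [hlt]
      have hA : stepA tp (c, acc) (pre.length : Int) v
          = (if x0 < v then c + 1 else c, acc ++ [if x0 < v then c + 1 else c]) := by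
        simp only [stepA, htpb]
        by_cases hlt : x0 < v <;> simp [hlt]
      have hB : stepB x0 (seen, c, acc) v
          = (PySem.Set.add seen v, if x0 < v then c + 1 else c,
             acc ++ [if x0 < v then c + 1 else c]) := by
        simp only [stepB, hcontains]
        simp
      simp only [enumFold, List.foldl_cons, hA, hB, hlen]
      exact ih (pre ++ [v]) (by rw [hxs]; simp) (by simp) _ _ (PySem.Set.add seen v)
        (by intro w
            rw [PySem.Set.mem_add, hseen w]
            simp [List.mem_append]
            tauto)

-- ===== VERDICT =====
theorem extract_num_available_instances_plot_spec : Claim_equal_extract_num_available_instances_plot := by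
  unfold Claim_equal_extract_num_available_instances_plot
  intro xs m _hdom hpre
  unfold Pre_extract_num_available_instances_plot at hpre
  unfold Spec_extract_num_available_instances_plot
  obtain ⟨x, rest, rfl⟩ : ∃ x rest, xs = x :: rest := by
    cases xs with
    | nil => exact absurd rfl hpre
    | cons x rest => exact ⟨x, rest, rfl⟩
  -- close A's port into structural form
  have hA : extract_num_available_instances_plot (x :: rest) m
      = (enumFold (stepA (tpD (x :: rest) m x)) (x, []) 0 (x :: rest)).2 := by
    unfold extract_num_available_instances_plot
    have hb1 : (fun (d : PySem.Dict Int Int) (i : Int) =>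
        if d.contains (PySem.List.pyGetD (x :: rest) i 0) then d
        else d.insert (PySem.List.pyGetD (x :: rest) i 0) i)
        = (fun (d : PySem.Dict Int Int) (i : Int) =>
            (fun (d : PySem.Dict Int Int) (j v : Int) =>
              if d.contains v then d else d.insert v j) d (0 + i)
              (PySem.List.pyGetD (x :: rest) i 0)) := by
      funext d i; rw [zero_add]
    rw [hb1, foldl_pyRange_idx
      (fun (d : PySem.Dict Int Int) (j v : Int) => if d.contains v then d else d.insert v j)
      (0 : Int) (x :: rest) 0 ((PySem.Dict.empty).insert m 0)]
    rw [PySem.List.pyGetD_zero_cons]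
    have key : ∀ tp : List Int,
        (List.foldl (fun (st : Int × List Int) (i : Int) =>
            let cur := if tp.contains i then st.1 + 1 else st.1
            (cur, st.2 ++ [cur])) (x, ([] : List Int))
          (PySem.List.pyRange 0 (((x :: rest).length : Int)) 1))
        = enumFold (stepA tp) (x, []) 0 (x :: rest) := by
      intro tp
      have hb2 : (fun (st : Int × List Int) (i : Int) =>
          let cur := if tp.contains i then st.1 + 1 else st.1
          (cur, st.2 ++ [cur]))
          = fun (st : Int × List Int) (i : Int) =>
              stepA tp st (0 + i) (PySem.List.pyGetD (x :: rest) i 0) := by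
        funext st i
        simp only [stepA, zero_add]
      rw [hb2, foldl_pyRange_idx (stepA tp) (0 : Int) (x :: rest) 0 (x, [])]
    exact congrArg Prod.snd (key (tpD (x :: rest) m x))
  -- close B's port into structural form
  have hB : extract_num_available_instances_plot_alt (x :: rest) m
      = ((x :: rest).foldl (stepB x)
          (PySem.Set.ofList [m, x], if x < m then x + 1 else x, ([] : List Int))).2.2 := by
    unfold extract_num_available_instances_plot_alt
    rw [PySem.List.pyGetD_zero_cons]
    rfl
  rw [hA, hB]
  -- the turn_point membership facts
  have H : ∀ (pre : List Int) (v : Int) (ys : List Int),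
      (x :: rest) = pre ++ v :: ys → pre ≠ [] →
      (((pre.length : Int) ∈ tpD (x :: rest) m x) ↔ (v ∉ pre ∧ v ≠ m ∧ x < v)) := by
    intro pre v ys hx hp
    rw [hx]
    exact tpD_pos pre v ys m x hp
  have h0 : ((0 : Int) ∈ tpD (x :: rest) m x) ↔ x < m := tpD_zero _ m x (by simp)
  -- first step of A
  have hA1 : (enumFold (stepA (tpD (x :: rest) m x)) (x, []) 0 (x :: rest))
      = enumFold (stepA (tpD (x :: rest) m x))
          (if x < m then x + 1 else x, [if x < m then x + 1 else x]) (0 + 1) rest := by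
    simp only [enumFold]
    congr 1
    have hc : (tpD (x :: rest) m x).contains 0 = decide (x < m) := by
      by_cases hlt : x < m
      · have : (tpD (x :: rest) m x).contains 0 = true :=
          List.elem_eq_true_of_mem (h0.mpr hlt)
        rw [this]
        simp [hlt]
      · have hnot : ¬ ((0 : Int) ∈ tpD (x :: rest) m x) := fun h => hlt (h0.mp h)
        have : (tpD (x :: rest) m x).contains 0 = false :=
          Bool.eq_false_iff.mpr (fun hc => hnot (List.mem_of_elem_eq_true hc))
        rw [this]
        simp [hlt]
    simp only [stepA, hc]
    by_cases hlt : x < m <;> simp [hlt]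
  -- first step of B
  have hB1 : ((x :: rest).foldl (stepB x)
      (PySem.Set.ofList [m, x], if x < m then x + 1 else x, ([] : List Int)))
      = rest.foldl (stepB x)
          (PySem.Set.ofList [m, x], if x < m then x + 1 else x, [if x < m then x + 1 else x]) := by
    simp only [List.foldl_cons]
    congr 1
    have hc : PySem.Set.contains (PySem.Set.ofList [m, x]) x = true := by
      rw [PySem.Set.contains_iff, PySem.Set.mem_ofList]
      simp
    simp only [stepB, hc]
    simp
  rw [hA1, hB1]
  have hlen : ((0 : Int) + 1) = ((([x] : List Int).length : Int)) := by simp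
  rw [hlen]
  exact (loop_agree m x (tpD (x :: rest) m x) (x :: rest) H rest [x] rfl (by simp)
    (if x < m then x + 1 else x) [if x < m then x + 1 else x]
    (PySem.Set.ofList [m, x])
    (by intro w; rw [PySem.Set.mem_ofList]; simp)).2
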